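-- pv_equiv track=rewrite | github.com/jose-puentes/job-platform-dice | apps/ai-service/app/services/docx_builder.py | _trim_used_lines
-- ===== SOURCE A (Python) =====
-- def _trim_used_lines(lines: list[str], header_lines: list[str]) -> list[str]:
--     trimmed = list(lines)
--     for header_line in header_lines:
--         for index, line in enumerate(trimmed):
--             if line.strip() == header_line.strip():
--                 trimmed = trimmed[index + 1 :]
--                 break
--     return trimmed
-- ===== SOURCE B (Python) =====
-- def _trim_used_lines(lines: list[str], header_lines: list[str]) -> list[str]:
--     # Single forward pointer over the original list with all lines stripped once
--     # up front: no repeated slicing/copying, no re-stripping per header.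
--     stripped = [line.strip() for line in lines]
--     n = len(lines)
--     pos = 0
--     for header in header_lines:
--         target = header.strip()
--         i = pos
--         while i < n:
--             if stripped[i] == target:
--                 pos = i + 1
--                 break
--             i += 1
--     return lines[pos:]
-- ===== Notes on version B (the rewrite author's own statement) =====
-- stated objective: faster
-- what changed: Replaces the per-header rescan of a freshly copied/sliced list (stripping every remaining line again for each header) with one upfront pass that strips all lines, then a single forward index pointer per header and one final slice.
import Mathlib
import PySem

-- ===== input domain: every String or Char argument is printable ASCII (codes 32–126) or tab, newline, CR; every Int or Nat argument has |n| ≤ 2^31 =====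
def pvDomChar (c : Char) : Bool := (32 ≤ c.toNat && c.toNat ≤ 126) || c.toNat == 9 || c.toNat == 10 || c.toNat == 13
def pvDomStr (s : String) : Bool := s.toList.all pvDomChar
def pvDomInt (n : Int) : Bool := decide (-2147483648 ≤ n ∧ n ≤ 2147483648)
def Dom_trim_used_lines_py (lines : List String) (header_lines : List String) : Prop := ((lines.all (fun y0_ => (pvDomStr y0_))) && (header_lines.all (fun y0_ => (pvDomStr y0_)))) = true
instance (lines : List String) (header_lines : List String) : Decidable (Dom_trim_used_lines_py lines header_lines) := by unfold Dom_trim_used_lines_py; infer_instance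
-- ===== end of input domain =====

-- B strips every line once up front and keeps a single forward index pointer instead of
-- re-stripping and re-slicing a copied list per header (constant-factor speed-up).

-- ===== PORT A =====
-- inner 'for index, line in enumerate(trimmed): if …: trimmed = trimmed[index+1:]; break'
def pvAGo (header : String) (rest : List String) (index : Nat) (trimmed : List String) : List String :=
  match rest with
  | [] => trimmed
  | line :: ls =>
    if PySem.Str.strip line == PySem.Str.strip header then
      PySem.List.slice trimmed (some ((index : Int) + 1)) none
    else pvAGo header ls (index + 1) trimmed

def trim_used_lines_py (lines : List String) (header_lines : List String) : List String :=
  header_lines.foldl (fun trimmed header_line => pvAGo header_line trimmed 0 trimmed) lines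

-- ===== PORT B =====
-- 'i = pos; while i < n: if stripped[i] == target: pos = i+1; break; i += 1' (returns the new pos, none if no match)
def pvBScan (stripped : List String) (target : String) (n i : Nat) : Option Nat :=
  if _h : i < n then
    if stripped.getD i "" == target then some (i + 1)
    else pvBScan stripped target n (i + 1)
  else none
termination_by n - i

def trim_used_lines_py_alt (lines : List String) (header_lines : List String) : List String :=
  let stripped := lines.map PySem.Str.strip
  let n := lines.length
  let pos := header_lines.foldl (fun pos header =>
    match pvBScan stripped (PySem.Str.strip header) n pos with
    | some p => p
    | none => pos) 0
  PySem.List.slice lines (some (pos : Int)) none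

-- ===== PRECONDITION & SPEC =====
def Spec_trim_used_lines_py (lines : List String) (header_lines : List String) (out : List String) : Prop := out = trim_used_lines_py_alt lines header_lines
instance (lines : List String) (header_lines : List String) (out : List String) : Decidable (Spec_trim_used_lines_py lines header_lines out) := by unfold Spec_trim_used_lines_py; infer_instance

-- ===== CLAIM (what is proved, stated in full; the proofs are below) =====
def Claim_equal_trim_used_lines_py : Prop := ∀ (lines : List String) (header_lines : List String), Dom_trim_used_lines_py lines header_lines → Spec_trim_used_lines_py lines header_lines (trim_used_lines_py lines header_lines)

-- ===== LEMMAS AND PROOFS =====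

-- index of the first element whose strip equals the target (A's inner scan, result only)
def pvFindS (target : String) : List String → Option Nat
  | [] => none
  | l :: ls => if PySem.Str.strip l == target then some 0 else (pvFindS target ls).map (· + 1)

-- index of the first element equal to the target (B scans pre-stripped lines)
def pvFindE (target : String) : List String → Option Nat
  | [] => none
  | l :: ls => if l == target then some 0 else (pvFindE target ls).map (· + 1)

theorem pvFindE_map_strip (target : String) (xs : List String) :
    pvFindE target (xs.map PySem.Str.strip) = pvFindS target xs := by
  induction xs with
  | nil => rfl
  | cons x xs ih => simp only [List.map_cons, pvFindE, pvFindS, ih]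

theorem pvAGo_eq (header : String) (rest : List String) (index : Nat) (trimmed : List String) :
    pvAGo header rest index trimmed =
      match pvFindS (PySem.Str.strip header) rest with
      | some i => trimmed.drop (index + i + 1)
      | none => trimmed := by
  induction rest generalizing index with
  | nil => simp [pvAGo, pvFindS]
  | cons l ls ih =>
    cases h : (PySem.Str.strip l == PySem.Str.strip header) with
    | true =>
      have hA : pvAGo header (l :: ls) index trimmed
          = PySem.List.slice trimmed (some ((index : Int) + 1)) none := by
        simp [pvAGo, h]
      have hF : pvFindS (PySem.Str.strip header) (l :: ls) = some 0 := by
        simp [pvFindS, h]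
      rw [hA, hF, PySem.List.slice_from trimmed (by omega)]
      have : ((index : Int) + 1).toNat = index + 0 + 1 := by omega
      rw [this]
    | false =>
      have hA : pvAGo header (l :: ls) index trimmed = pvAGo header ls (index + 1) trimmed := by
        simp [pvAGo, h]
      have hF : pvFindS (PySem.Str.strip header) (l :: ls)
          = (pvFindS (PySem.Str.strip header) ls).map (· + 1) := by
        simp [pvFindS, h]
      rw [hA, hF, ih]
      cases hf : pvFindS (PySem.Str.strip header) ls with
      | none => simp
      | some i =>
        simp only [Option.map_some]
        have : index + 1 + i + 1 = index + (i + 1) + 1 := by omega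
        rw [this]

theorem pvBScan_eq (stripped : List String) (target : String) (i : Nat) :
    pvBScan stripped target stripped.length i =
      (pvFindE target (stripped.drop i)).map (fun j => i + j + 1) := by
  by_cases h : i < stripped.length
  · have hg : stripped.getD i "" = stripped[i] := List.getD_eq_getElem stripped "" h
    rw [List.drop_eq_getElem_cons h]
    cases he : (stripped[i] == target) with
    | true =>
      rw [pvBScan]
      simp [dif_pos h, List.getD_eq_getElem?_getD, List.getElem?_eq_getElem h, he, pvFindE]
    | false =>
      have hB : pvBScan stripped target stripped.length i
          = pvBScan stripped target stripped.length (i + 1) := by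
        rw [pvBScan]
        simp [dif_pos h, List.getD_eq_getElem?_getD, List.getElem?_eq_getElem h, he]
      have hF : pvFindE target (stripped[i] :: stripped.drop (i + 1))
          = (pvFindE target (stripped.drop (i + 1))).map (· + 1) := by
        simp [pvFindE, he]
      rw [hB, pvBScan_eq stripped target (i + 1), hF]
      cases hf : pvFindE target (stripped.drop (i + 1)) with
      | none => simp
      | some j =>
        simp only [Option.map_some]
        have : i + 1 + j + 1 = i + (j + 1) + 1 := by omega
        rw [this]
  · rw [pvBScan]
    rw [List.drop_eq_nil_of_le (by omega)]
    simp [dif_neg h, pvFindE]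
termination_by stripped.length - i

-- B's per-header update, expressed through pvFindS on the suffix of the original lines
theorem pvBStep_eq (lines : List String) (h : String) (pos : Nat) :
    (match pvBScan (lines.map PySem.Str.strip) (PySem.Str.strip h) lines.length pos with
     | some q => q
     | none => pos)
      = match pvFindS (PySem.Str.strip h) (lines.drop pos) with
        | some i => pos + i + 1
        | none => pos := by
  have hb := pvBScan_eq (lines.map PySem.Str.strip) (PySem.Str.strip h) pos
  rw [show (lines.map PySem.Str.strip).length = lines.length from by simp] at hb
  rw [hb, ← List.map_drop, pvFindE_map_strip]
  cases hf : pvFindS (PySem.Str.strip h) (lines.drop pos) <;> simp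

theorem pv_fold_inv (hs : List String) (lines : List String) (pos : Nat) :
    hs.foldl (fun trimmed header_line => pvAGo header_line trimmed 0 trimmed) (lines.drop pos)
      = lines.drop (hs.foldl (fun p header =>
          match pvBScan (lines.map PySem.Str.strip) (PySem.Str.strip header) lines.length p with
          | some q => q
          | none => p) pos) := by
  induction hs generalizing pos with
  | nil => rfl
  | cons h hs ih =>
    simp only [List.foldl_cons]
    rw [pvAGo_eq, pvBStep_eq]
    cases hf : pvFindS (PySem.Str.strip h) (lines.drop pos) with
    | none => exact ih pos
    | some i =>
      simp only []
      rw [List.drop_drop]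
      have h1 : pos + (0 + i + 1) = pos + i + 1 := by omega
      rw [h1]
      exact ih (pos + i + 1)

-- ===== VERDICT (by name: the statement is the Claim_ definition above) =====
theorem trim_used_lines_py_spec : Claim_equal_trim_used_lines_py := by
  intro lines header_lines _
  unfold Spec_trim_used_lines_py trim_used_lines_py trim_used_lines_py_alt
  simp only [PySem.List.slice_from_natCast]
  have := pv_fold_inv header_lines lines 0
  simpa using this
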